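-- pv_equiv track=rewrite | github.com/schiob/TestingSistemas | ago-dic-2020/practicas/practica2/Practica-pair.py | validaciones
-- ===== SOURCE A (Python) =====
-- def validaciones(lista,actuales,deseados):
--     listaCopia = list(lista)
--     pantalonesAVender = listaCopia[:actuales-deseados]  #lista  de los n pantalones mas caros
--
--     #######Verifica que te quedes con minimo un pantalon
--     for i in pantalonesAVender:
--         listaCopia.remove(i)
--     for i in lista:
--         if i not in listaCopia:
--             return False
--
--     ######Verifica que no sean mas de 5 marcas
--     marcas = [i[0] for i in pantalonesAVender]
--     numMarcas = {i: marcas.count(i) for i in marcas}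
--     for v in numMarcas.values():
--         if v >= 5:
--             return False
--
--     return True
-- ===== SOURCE B (Python) =====
-- def validaciones(lista, actuales, deseados):
--     vender = lista[:actuales - deseados]
--     resto = lista[len(vender):]
--     if any(v not in resto for v in vender):
--         return False
--     marcas = [i[0] for i in vender]
--     return all(marcas.count(m) < 5 for m in marcas)
-- ===== Notes on version B (the rewrite author's own statement) =====
-- stated objective: simpler
-- what changed: Replaces the copy+remove-loop (which rebuilds the suffix by repeated list.remove) and the dict comprehension of brand counts with direct slicing: the kept suffix is just lista[len(vender):], the sell check is a membership test of each sold item in that suffix, and the brand limit is a plain all() over counts with no dict.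
import Mathlib
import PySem

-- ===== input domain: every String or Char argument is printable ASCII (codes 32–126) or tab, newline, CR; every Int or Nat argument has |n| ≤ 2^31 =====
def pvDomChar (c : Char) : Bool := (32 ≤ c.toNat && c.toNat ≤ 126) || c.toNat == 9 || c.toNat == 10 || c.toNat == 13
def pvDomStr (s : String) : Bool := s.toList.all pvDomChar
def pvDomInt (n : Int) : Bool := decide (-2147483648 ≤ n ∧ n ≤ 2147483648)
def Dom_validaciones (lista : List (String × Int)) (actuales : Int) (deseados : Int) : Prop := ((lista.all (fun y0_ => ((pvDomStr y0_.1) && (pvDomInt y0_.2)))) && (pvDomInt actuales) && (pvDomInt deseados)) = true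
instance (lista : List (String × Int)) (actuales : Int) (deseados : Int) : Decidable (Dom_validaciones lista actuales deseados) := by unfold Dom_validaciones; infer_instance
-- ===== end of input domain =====

-- B replaces A's copy+remove-loop and brand-count dict with direct slicing, a membership
-- test against the kept suffix, and a plain all() over counts (objective: simpler).


-- ===== PORT A =====
-- 'listaCopia.remove(i)' can never raise ValueError here: the removed items are the
-- first elements of the copy itself, so 'remove?' always returns 'some'; the '.getD st'
-- fallback is dead code kept only to make the fold total.
def validaciones (lista : List (String × Int)) (actuales : Int) (deseados : Int) : Bool :=
  let pantalonesAVender := PySem.List.slice lista none (some (actuales - deseados))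
  let listaCopia := pantalonesAVender.foldl
    (fun st i => (PySem.List.remove? st i).getD st) lista
  if lista.any (fun i => !(listaCopia.contains i)) then false
  else
    let marcas := pantalonesAVender.map Prod.fst
    let numMarcas := marcas.foldl
      (fun d i => d.insert i ((PySem.List.count marcas i : Int))) PySem.Dict.empty
    if numMarcas.values.any (fun v => v ≥ 5) then false
    else true

-- ===== PORT B =====
def validaciones_alt (lista : List (String × Int)) (actuales : Int) (deseados : Int) : Bool :=
  let vender := PySem.List.slice lista none (some (actuales - deseados))
  let resto := PySem.List.slice lista (some (vender.length : Int)) none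
  if vender.any (fun v => !(resto.contains v)) then false
  else
    let marcas := vender.map Prod.fst
    marcas.all (fun m => PySem.List.count marcas m < 5)

-- ===== PRECONDITION & SPEC =====
def Spec_validaciones (lista : List (String × Int)) (actuales : Int) (deseados : Int) (out : Bool) : Prop := out = validaciones_alt lista actuales deseados
instance (lista : List (String × Int)) (actuales : Int) (deseados : Int) (out : Bool) : Decidable (Spec_validaciones lista actuales deseados out) := by unfold Spec_validaciones; infer_instance

-- ===== CLAIM (what is proved, stated in full; the proofs are below) =====
def Claim_equal_validaciones : Prop := ∀ (lista : List (String × Int)) (actuales : Int) (deseados : Int), Dom_validaciones lista actuales deseados → Spec_validaciones lista actuales deseados (validaciones lista actuales deseados)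

-- ===== LEMMAS AND PROOFS =====

-- the prefix slice is a 'take'
theorem slice_to_eq_take {α : Type} (xs : List α) (b : Int) :
    PySem.List.slice xs none (some b) = xs.take (PySem.List.clampIdx xs.length b) := by
  simp [PySem.List.slice]

-- removing the elements of a prefix, front to back, leaves the suffix
theorem foldl_remove_prefix {α : Type} [BEq α] [LawfulBEq α] (p s : List α) :
    p.foldl (fun st i => (PySem.List.remove? st i).getD st) (p ++ s) = s := by
  induction p with
  | nil => rfl
  | cons a p ih =>
    simp only [List.cons_append, List.foldl_cons, PySem.List.remove?_cons_self, Option.getD_some]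
    exact ih

-- lookup in a dict built by inserting (x, f x) for each x of a list
theorem getD_foldl_insert_fn {κ : Type} [DecidableEq κ] (l : List κ) (f : κ → Int)
    (d : PySem.Dict κ Int) (k : κ) (d0 : Int) :
    (l.foldl (fun d x => d.insert x (f x)) d).getD k d0
      = if k ∈ l then f k else d.getD k d0 := by
  induction l generalizing d with
  | nil => simp
  | cons a l ih =>
    simp only [List.foldl_cons, ih, List.mem_cons, PySem.Dict.getD_insert]
    by_cases hl : k ∈ l
    · simp [hl]
    · by_cases ha : k = a <;> simp [hl, ha]

-- ===== VERDICT (by name: the statement is the Claim_ definition above) =====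
theorem validaciones_spec : Claim_equal_validaciones := by
  intro lista actuales deseados _
  unfold Spec_validaciones validaciones validaciones_alt
  simp only [slice_to_eq_take]
  set m := PySem.List.clampIdx lista.length (actuales - deseados) with hm
  have hmle : m ≤ lista.length := PySem.List.clampIdx_le _ _
  have hlen : (lista.take m).length = m := by simp [hmle]
  have hresto : PySem.List.slice lista (some (((lista.take m).length : Nat) : Int)) none
      = lista.drop m := by
    rw [PySem.List.slice_from_natCast, hlen]
  have hsplit : lista = lista.take m ++ lista.drop m := (List.take_append_drop m lista).symm
  have hcopia : (lista.take m).foldl (fun st i => (PySem.List.remove? st i).getD st) lista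
      = lista.drop m := by
    have h := foldl_remove_prefix (lista.take m) (lista.drop m)
    rwa [List.take_append_drop] at h
  rw [hcopia, hresto]
  have hany : lista.any (fun i => !((lista.drop m).contains i))
      = (lista.take m).any (fun i => !((lista.drop m).contains i)) := by
    have hfa : (lista.drop m).any (fun i => !((lista.drop m).contains i)) = false := by
      simp only [List.any_eq_false]
      intro x hx
      simp [hx]
    have happ := List.any_append (xs := lista.take m) (ys := lista.drop m)
      (f := fun i => !((lista.drop m).contains i))
    rw [List.take_append_drop] at happ
    rw [happ, hfa, Bool.or_false]
  rw [hany]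
  refine if_congr Iff.rfl rfl ?_
  -- brand check: dict values vs plain all
  set marcas := (lista.take m).map Prod.fst with hmar
  set d := marcas.foldl (fun d i => d.insert i ((PySem.List.count marcas i : Int))) PySem.Dict.empty with hd
  have hnd : d.keys.Nodup := PySem.Dict.nodup_keys_foldl_insert _ _ _ PySem.Dict.nodup_keys_empty
  have hkeys : d.keys = PySem.Set.ofList marcas := by
    rw [hd, PySem.Dict.keys_foldl_insert, PySem.Dict.keys_empty]
    rfl
  have hvals : d.values = d.keys.map (fun k => d.getD k 0) :=
    PySem.Dict.values_eq_map_keys d hnd 0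
  have hgetD : ∀ k ∈ marcas, d.getD k 0 = (PySem.List.count marcas k : Int) := by
    intro k hk
    rw [hd, getD_foldl_insert_fn, if_pos hk]
  have hvalsany : d.values.any (fun v => v ≥ 5)
      = marcas.any (fun k => decide (5 ≤ (PySem.List.count marcas k : Int))) := by
    rw [hvals, hkeys, List.any_map, Bool.eq_iff_iff]
    simp only [List.any_eq_true, Function.comp, decide_eq_true_eq, ge_iff_le]
    constructor
    · rintro ⟨k, hk, h5⟩
      have hkm : k ∈ marcas := (PySem.Set.mem_ofList _ _).mp hk
      exact ⟨k, hkm, by rwa [hgetD k hkm] at h5⟩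
    · rintro ⟨k, hk, h5⟩
      exact ⟨k, (PySem.Set.mem_ofList _ _).mpr hk, by rwa [hgetD k hk]⟩
  rw [hvalsany]
  cases hA : marcas.any (fun k => decide (5 ≤ (PySem.List.count marcas k : Int))) with
  | true =>
    simp only [if_true]
    symm
    obtain ⟨k, hk, h5⟩ := List.any_eq_true.mp hA
    simp only [decide_eq_true_eq] at h5
    simp only [List.all_eq_false]
    refine ⟨k, hk, by simp only [decide_eq_true_eq]; intro h; omega⟩
  | false =>
    simp only [Bool.false_eq_true, if_false]
    symm
    simp only [List.all_eq_true]
    intro k hk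
    have := List.any_eq_false.mp hA k hk
    simp only [decide_eq_true_eq] at this ⊢
    omega
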